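-- pv_equiv track=rewrite | github.com/didudash/advent_of_code | 2025/01/main.py | part_1
-- ===== SOURCE A (Python) =====
-- def part_1(data):
--     pos = 50
--     psw = 0
--     for n in data:
--         # Circular
--         pos = (pos + n) % 100
--         if pos == 0:
--             psw += 1
--     return psw
-- ===== SOURCE B (Python) =====
-- def part_1(data):
--     # Divide and conquer: position hits 0 after a prefix exactly when the prefix
--     # sum t satisfies (50 + t) % 100 == 0, i.e. t = -50 (mod 100).  go(seg, target)
--     # returns (sum(seg), number of nonempty prefixes of seg whose sum = target mod 100);
--     # for the right half the target is shifted by the left half's sum.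
--     def go(seg, target):
--         if not seg:
--             return (0, 0)
--         if len(seg) == 1:
--             return (seg[0], 1 if (seg[0] - target) % 100 == 0 else 0)
--         mid = len(seg) // 2
--         s1, c1 = go(seg[:mid], target)
--         s2, c2 = go(seg[mid:], target - s1)
--         return (s1 + s2, c1 + c2)
--     return go(data, -50)[1]
-- ===== Notes on version B (the rewrite author's own statement) =====
-- stated objective: alternative
-- what changed: B replaces A's single fused left-to-right loop by a divide-and-conquer recursion: it splits the list at the midpoint, counts in each half the nonempty prefixes whose sum is = target (mod 100) (target -50, shifted by the left half's sum for the right half), and adds the counts.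
import Mathlib
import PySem

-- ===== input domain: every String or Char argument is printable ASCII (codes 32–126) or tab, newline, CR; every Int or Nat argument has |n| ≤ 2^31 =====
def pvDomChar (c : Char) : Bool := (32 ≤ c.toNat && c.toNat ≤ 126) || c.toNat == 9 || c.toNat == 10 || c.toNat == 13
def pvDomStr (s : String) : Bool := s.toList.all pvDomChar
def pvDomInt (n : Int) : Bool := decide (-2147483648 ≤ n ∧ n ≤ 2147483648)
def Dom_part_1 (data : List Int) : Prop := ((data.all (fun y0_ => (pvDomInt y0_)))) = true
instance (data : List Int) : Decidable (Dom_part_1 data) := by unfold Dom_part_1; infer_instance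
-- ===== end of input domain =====

-- B replaces A's fused left-to-right loop by a divide-and-conquer count of prefix sums = target (mod 100); same result, alternative structure.

-- ===== PORT A =====
-- one fused loop carrying (pos, psw)
def part_1 (data : List Int) : Int :=
  (data.foldl
    (fun (st : Int × Int) n =>
      let pos := PySem.Int.mod (st.1 + n) 100
      (pos, if pos = 0 then st.2 + 1 else st.2))
    (50, 0)).2

-- ===== PORT B =====
-- go(seg, target) = (sum seg, #nonempty prefixes of seg with sum = target mod 100)
def pvGo (seg : List Int) (target : Int) : Int × Int :=
  match _h : seg with
  | [] => (0, 0)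
  | [x] => (x, if PySem.Int.mod (x - target) 100 = 0 then 1 else 0)
  | _ :: _ :: _ =>
    let mid := seg.length / 2
    let l := pvGo (seg.take mid) target
    let r := pvGo (seg.drop mid) (target - l.1)
    (l.1 + r.1, l.2 + r.2)
termination_by seg.length
decreasing_by
  · simp_all [List.length_take]; omega
  · simp_all [List.length_drop]; omega

def part_1_alt (data : List Int) : Int := (pvGo data (-50)).2

-- ===== PRECONDITION & SPEC =====
def Spec_part_1 (data : List Int) (out : Int) : Prop := out = part_1_alt data
instance (data : List Int) (out : Int) : Decidable (Spec_part_1 data out) := by unfold Spec_part_1; infer_instance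

-- ===== CLAIM (what is proved, stated in full; the proofs are below) =====
def Claim_equal_part_1 : Prop := ∀ (data : List Int), Dom_part_1 data → Spec_part_1 data (part_1 data)

-- ===== LEMMAS AND PROOFS =====

-- reference count: pvCnt seg tg = #nonempty prefixes of seg with sum = tg mod 100
def pvCnt : List Int → Int → Int
  | [], _ => 0
  | n :: rest, tg => (if PySem.Int.mod (n - tg) 100 = 0 then 1 else 0) + pvCnt rest (tg - n)

theorem pvCnt_append (l r : List Int) (tg : Int) :
    pvCnt (l ++ r) tg = pvCnt l tg + pvCnt r (tg - l.sum) := by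
  induction l generalizing tg with
  | nil => simp [pvCnt]
  | cons n rest ih =>
    simp only [List.cons_append, pvCnt, List.sum_cons, ih]
    ring_nf

theorem pvGo_correct (seg : List Int) (tg : Int) :
    pvGo seg tg = (seg.sum, pvCnt seg tg) := by
  induction seg, tg using pvGo.induct with
  | case1 => simp [pvGo, pvCnt]
  | case2 tg x => simp [pvGo, pvCnt, sub_eq_neg_add, add_comm]
  | case3 tg a b rest mid l ih1 ih1' ih2 =>
    have e1 : l.1 = (List.take mid (a :: b :: rest)).sum := by
      show (pvGo (List.take mid (a :: b :: rest)) tg).1 = _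
      rw [ih1]
    have e2 : l.2 = pvCnt (List.take mid (a :: b :: rest)) tg := by
      show (pvGo (List.take mid (a :: b :: rest)) tg).2 = _
      rw [ih1]
    rw [e1] at ih2
    rw [pvGo]
    show (l.1 + (pvGo (List.drop mid (a :: b :: rest)) (tg - l.1)).1,
          l.2 + (pvGo (List.drop mid (a :: b :: rest)) (tg - l.1)).2)
        = ((a :: b :: rest).sum, pvCnt (a :: b :: rest) tg)
    rw [e1, e2, ih2]
    conv_rhs => rw [← List.take_append_drop mid (a :: b :: rest)]
    rw [List.sum_append, pvCnt_append]

-- A's fold, started at ((50+t) mod 100, c), counts prefixes with sum = -50-t mod 100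
theorem pv_main (data : List Int) (t c : Int) :
    (data.foldl
      (fun (st : Int × Int) n =>
        let pos := PySem.Int.mod (st.1 + n) 100
        (pos, if pos = 0 then st.2 + 1 else st.2))
      (PySem.Int.mod (50 + t) 100, c)).2
    = c + pvCnt data (-50 - t) := by
  induction data generalizing t c with
  | nil => simp [pvCnt]
  | cons n rest ih =>
    simp only [List.foldl_cons]
    have hm : PySem.Int.mod (PySem.Int.mod (50 + t) 100 + n) 100
        = PySem.Int.mod (50 + (t + n)) 100 := by
      have h1 : PySem.Int.mod (50 + t) 100 = (50 + t) % 100 :=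
        PySem.Int.mod_eq_emod_of_pos (by norm_num)
      have h2 : PySem.Int.mod ((50 + t) % 100 + n) 100 = ((50 + t) % 100 + n) % 100 :=
        PySem.Int.mod_eq_emod_of_pos (by norm_num)
      have h3 : PySem.Int.mod (50 + (t + n)) 100 = (50 + (t + n)) % 100 :=
        PySem.Int.mod_eq_emod_of_pos (by norm_num)
      rw [h1, h2, h3]; omega
    simp only [hm]
    rw [ih (t + n)]
    simp only [pvCnt, PySem.Int.mod_eq_zero_iff_dvd,
      show (-50 : Int) - t - n = -50 - (t + n) by ring,
      show n - (-50 - t) = 50 + (t + n) by ring]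
    split_ifs <;> ring

-- ===== VERDICT (by name: the statement is the Claim_ definition above) =====
theorem part_1_spec : Claim_equal_part_1 := by
  intro data _
  show part_1 data = part_1_alt data
  unfold part_1 part_1_alt
  rw [pvGo_correct]
  have h0 : (50 : Int) = PySem.Int.mod (50 + 0) 100 := by
    rw [PySem.Int.mod_eq_emod_of_pos (by norm_num)]; decide
  rw [h0, pv_main data 0 0]
  norm_num
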